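-- pv_equiv track=rewrite | github.com/adriandalion/CMSC-162-Project-1 | pcx_viewer.py | compute_grayscale_rows_and_hist
-- ===== SOURCE A (Python) =====
-- from typing import List, Tuple
--
-- def compute_grayscale_rows_and_hist(rgb_rows: List[List[Tuple[int,int,int]]]):
--     gray_rows = []
--     ghist = [0]*256
--     for row in rgb_rows:
--         prow = []
--         for (r,g,b) in row:
--             s = int((r+g+b)/3)
--             prow.append((s,s,s))
--             ghist[s] += 1
--         gray_rows.append(prow)
--     return gray_rows, ghist
-- ===== SOURCE B (Python) =====
-- def _gray(px):
--     r, g, b = px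
--     return int((r + g + b) / 3)
--
-- def compute_grayscale_rows_and_hist(rgb_rows):
--     # Pass 1: pure grayscale map.
--     gray_rows = [[(s, s, s) for s in map(_gray, row)] for row in rgb_rows]
--     # Pass 2: sparse tally of the distinct gray values in a dict.
--     tally = {}
--     for s in (s for row in rgb_rows for s in map(_gray, row)):
--         tally[s] = tally.get(s, 0) + 1
--     # Pass 3: scatter the tally into the 256-bin list.
--     ghist = [0] * 256
--     for v, c in tally.items():
--         ghist[v] += c
--     return gray_rows, ghist
-- ===== Notes on version B (the rewrite author's own statement) =====
-- stated objective: alternative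
-- what changed: A's single interleaved loop that mutates a dense 256-bin list per pixel is replaced by a pure grayscale map plus a histogram computed sparsely: a dict tally of distinct gray values built once, then scattered into the 256-bin list.
import Mathlib
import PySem

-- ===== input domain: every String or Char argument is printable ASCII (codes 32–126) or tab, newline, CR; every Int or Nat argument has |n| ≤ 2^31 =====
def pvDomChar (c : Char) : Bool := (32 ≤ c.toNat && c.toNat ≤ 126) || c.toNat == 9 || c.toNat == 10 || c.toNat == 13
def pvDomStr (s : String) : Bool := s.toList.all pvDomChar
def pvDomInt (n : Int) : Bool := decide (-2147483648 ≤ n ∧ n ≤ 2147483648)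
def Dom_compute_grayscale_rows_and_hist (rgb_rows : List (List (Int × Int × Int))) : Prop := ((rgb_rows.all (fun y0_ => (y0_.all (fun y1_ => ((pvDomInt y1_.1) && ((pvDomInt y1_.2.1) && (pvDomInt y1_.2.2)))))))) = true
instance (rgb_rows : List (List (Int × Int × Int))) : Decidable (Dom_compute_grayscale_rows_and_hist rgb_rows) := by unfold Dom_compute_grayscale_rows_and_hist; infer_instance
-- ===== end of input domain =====

-- B replaces A's single interleaved loop (dense per-pixel histogram increments) by a pure grayscale map plus a sparse dict tally of gray values scattered into the 256-bin list (alternative decomposition, same cost).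


-- ===== PORT A =====
-- inner loop body: s = int((r+g+b)/3)  (truncating division = Int.tdiv, exact here);
-- prow.append((s,s,s)); ghist[s] += 1  (pyGetD/pySetD are exact under Pre_, which keeps s in Python index range)
def pvAPix (p : List (Int × Int × Int) × List Int) (t : Int × Int × Int) :
    List (Int × Int × Int) × List Int :=
  let s := Int.tdiv (t.1 + t.2.1 + t.2.2) 3
  (p.1 ++ [(s, s, s)], PySem.List.pySetD p.2 s (PySem.List.pyGetD p.2 s 0 + 1))

-- outer loop body: prow = []; inner loop over the row; gray_rows.append(prow)
def pvARow (st : List (List (Int × Int × Int)) × List Int) (row : List (Int × Int × Int)) :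
    List (List (Int × Int × Int)) × List Int :=
  let p := row.foldl pvAPix ([], st.2)
  (st.1 ++ [p.1], p.2)

def compute_grayscale_rows_and_hist (rgb_rows : List (List (Int × Int × Int))) :
    (List (List (Int × Int × Int))) × List Int :=
  rgb_rows.foldl pvARow ([], List.replicate 256 (0 : Int))

-- ===== PORT B =====
-- _gray(px) = int((r+g+b)/3)  (same truncating division, exact here)
def pvGray (t : Int × Int × Int) : Int :=
  Int.tdiv (t.1 + t.2.1 + t.2.2) 3

def compute_grayscale_rows_and_hist_alt (rgb_rows : List (List (Int × Int × Int))) :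
    (List (List (Int × Int × Int))) × List Int :=
  -- pass 1: pure grayscale map
  let gray_rows := rgb_rows.map (fun row => row.map (fun p => let s := pvGray p; (s, s, s)))
  -- pass 2: sparse tally {s: multiplicity} via tally[s] = tally.get(s, 0) + 1
  let tally := (rgb_rows.flatMap (fun row => row.map pvGray)).foldl
    (fun d s => d.insert s (d.getD s 0 + 1)) PySem.Dict.empty
  -- pass 3: scatter: for v, c in tally.items(): ghist[v] += c
  let ghist := tally.items.foldl
    (fun h vc => PySem.List.pySetD h vc.1 (PySem.List.pyGetD h vc.1 0 + vc.2))
    (List.replicate 256 (0 : Int))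
  (gray_rows, ghist)

-- ===== PRECONDITION & SPEC =====
-- Pre_ is exactly where the Python A returns: when some gray value int((r+g+b)/3) leaves
-- Python's index range [-256, 255] for the length-256 histogram (i.e. r+g+b < -770 or > 767),
-- ghist[s] raises IndexError; B raises there too.
def Pre_compute_grayscale_rows_and_hist (rgb_rows : List (List (Int × Int × Int))) : Prop :=
  ∀ row ∈ rgb_rows, ∀ t ∈ row, -770 ≤ t.1 + t.2.1 + t.2.2 ∧ t.1 + t.2.1 + t.2.2 ≤ 767
instance (rgb_rows : List (List (Int × Int × Int))) : Decidable (Pre_compute_grayscale_rows_and_hist rgb_rows) := by unfold Pre_compute_grayscale_rows_and_hist; infer_instance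

def pvWitness_compute_grayscale_rows_and_hist : (List (List (Int × Int × Int))) :=
  [[(0, 10, 255), (-3, 4, 5)], [], [(255, 255, 255)]]

def Spec_compute_grayscale_rows_and_hist (rgb_rows : List (List (Int × Int × Int))) (out : (List (List (Int × Int × Int))) × List Int) : Prop := out = compute_grayscale_rows_and_hist_alt rgb_rows
instance (rgb_rows : List (List (Int × Int × Int))) (out : (List (List (Int × Int × Int))) × List Int) : Decidable (Spec_compute_grayscale_rows_and_hist rgb_rows out) := by unfold Spec_compute_grayscale_rows_and_hist; infer_instance

-- ===== CLAIM (what is proved, stated in full; the proofs are below) =====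
def Claim_equal_compute_grayscale_rows_and_hist : Prop := ∀ (rgb_rows : List (List (Int × Int × Int))), Dom_compute_grayscale_rows_and_hist rgb_rows → Pre_compute_grayscale_rows_and_hist rgb_rows → Spec_compute_grayscale_rows_and_hist rgb_rows (compute_grayscale_rows_and_hist rgb_rows)

-- ===== LEMMAS AND PROOFS =====

-- 'bucket i gets c more': the one mutation both programs perform on the histogram
def pvAddAt (h : List Int) (i c : Int) : List Int :=
  PySem.List.pySetD h i (PySem.List.pyGetD h i 0 + c)

def pvScatter (h : List Int) (l : List (Int × Int)) : List Int :=
  l.foldl (fun h vc => pvAddAt h vc.1 vc.2) h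

theorem pvScatter_eq (h : List Int) (l : List (Int × Int)) :
    l.foldl (fun h vc => PySem.List.pySetD h vc.1 (PySem.List.pyGetD h vc.1 0 + vc.2)) h =
    pvScatter h l := rfl

theorem pvAddAt_eq (h : List Int) (i c : Int) :
    pvAddAt h i c = match PySem.List.pyIdx? h.length i with
      | none => h
      | some k => h.set k (h[k]?.getD 0 + c) := by
  simp only [pvAddAt, PySem.List.pySetD, PySem.List.pySet?, PySem.List.pyGetD, PySem.List.pyGet?]
  cases PySem.List.pyIdx? h.length i <;> simp

theorem pvAddAt_length (h : List Int) (i c : Int) : (pvAddAt h i c).length = h.length := by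
  rw [pvAddAt_eq]; cases PySem.List.pyIdx? h.length i <;> simp

theorem pvIdx_lt {n : Nat} {i : Int} {k : Nat} (h : PySem.List.pyIdx? n i = some k) :
    k < n := by
  simp only [PySem.List.pyIdx?] at h
  split_ifs at h <;> (injection h with h; omega)

theorem pvAddAt_add (h : List Int) (i c d : Int) :
    pvAddAt (pvAddAt h i c) i d = pvAddAt h i (c + d) := by
  rw [pvAddAt_eq h i c, pvAddAt_eq h i (c + d)]
  cases hk : PySem.List.pyIdx? h.length i with
  | none => rw [pvAddAt_eq]; rw [hk]
  | some k =>
    have hkl : k < h.length := pvIdx_lt hk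
    rw [pvAddAt_eq]
    simp only [List.length_set, hk, hkl, List.getElem?_eq_getElem, Option.getD_some, List.set_set]
    congr 1
    rw [List.getElem_set_self (by simpa using hkl)]
    ring

theorem pvAddAt_none {h : List Int} {i : Int}
    (hnone : PySem.List.pyIdx? h.length i = none) (c : Int) : pvAddAt h i c = h := by
  rw [pvAddAt_eq, hnone]

theorem pvAddAt_comm (h : List Int) (i c j d : Int) :
    pvAddAt (pvAddAt h i c) j d = pvAddAt (pvAddAt h j d) i c := by
  cases hi : PySem.List.pyIdx? h.length i with
  | none =>
    have e1 : pvAddAt h i c = h := pvAddAt_none hi c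
    have e2 : pvAddAt (pvAddAt h j d) i c = pvAddAt h j d :=
      pvAddAt_none (by rw [pvAddAt_length]; exact hi) c
    rw [e1, e2]
  | some ki =>
    cases hj : PySem.List.pyIdx? h.length j with
    | none =>
      have e1 : pvAddAt h j d = h := pvAddAt_none hj d
      have e2 : pvAddAt (pvAddAt h i c) j d = pvAddAt h i c :=
        pvAddAt_none (by rw [pvAddAt_length]; exact hj) d
      rw [e1, e2]
    | some kj =>
      have hkli := pvIdx_lt hi
      by_cases hk : ki = kj
      · subst hk
        rw [pvAddAt_eq h i c, pvAddAt_eq h j d, pvAddAt_eq, pvAddAt_eq]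
        simp only [List.length_set, hi, hj, List.set_set,
          List.getElem?_set_self hkli, Option.getD_some]
        congr 1
        ring
      · rw [pvAddAt_eq h i c, pvAddAt_eq h j d, pvAddAt_eq, pvAddAt_eq]
        simp only [List.length_set, hi, hj, List.getElem?_set_ne hk,
          List.getElem?_set_ne (Ne.symm hk)]
        rw [List.set_comm _ _ hk]

theorem pvScatter_addAt (l : List (Int × Int)) (h : List Int) (v d : Int) :
    pvScatter (pvAddAt h v d) l = pvAddAt (pvScatter h l) v d := by
  induction l generalizing h with
  | nil => rfl
  | cons vc l ih =>
    simp only [pvScatter, List.foldl_cons] at *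
    rw [pvAddAt_comm h v d vc.1 vc.2, ih]

theorem pvScatter_append_cons (h : List Int) (A : List (Int × Int)) (v c : Int)
    (B : List (Int × Int)) :
    pvScatter h (A ++ (v, c) :: B) = pvScatter (pvAddAt (pvScatter h A) v c) B := by
  simp [pvScatter, List.foldl_append]

-- scatter of the tally = one +1 per value, in any order
theorem pv_tally (xs : List Int) (h : List Int) :
    pvScatter h ((PySem.Dict.counter xs).items) = xs.foldl (fun h s => pvAddAt h s 1) h := by
  induction xs using List.reverseRecOn with
  | nil => rfl
  | append_singleton xs v ih =>
    rw [PySem.Dict.items_counter] at *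
    have hof : PySem.Set.ofList (xs ++ [v]) = PySem.Set.add (PySem.Set.ofList xs) v := by
      simp [PySem.Set.ofList, List.foldl_append]
    have hRHS : (xs ++ [v]).foldl (fun h s => pvAddAt h s 1) h =
        pvAddAt (xs.foldl (fun h s => pvAddAt h s 1) h) v 1 := by
      rw [List.foldl_append]; rfl
    rw [hRHS, ← ih]
    by_cases hv : v ∈ xs
    · have hmem : v ∈ PySem.Set.ofList xs := (PySem.Set.mem_ofList xs v).2 hv
      have hcont : (PySem.Set.ofList xs).contains v = true := by simpa using hmem
      rw [hof]
      simp only [PySem.Set.add, hcont, if_pos]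
      obtain ⟨l1, l2, hsplit⟩ := List.append_of_mem hmem
      have hnd := PySem.Set.nodup_ofList (xs := xs)
      rw [hsplit] at hnd
      have hv1 : v ∉ l1 := fun hc => (List.disjoint_of_nodup_append hnd) hc (by simp)
      have hv2 : v ∉ l2 := by
        have := (List.nodup_append.mp hnd).2.1
        simp [List.nodup_cons] at this; exact this.1
      have hmapeq : ∀ l : List Int, v ∉ l →
          l.map (fun k => (k, (List.count k (xs ++ [v]) : Int))) =
          l.map (fun k => (k, (List.count k xs : Int))) := by
        intro l hvl
        apply List.map_congr_left
        intro k hkl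
        have hk : k ≠ v := fun hkv => hvl (hkv ▸ hkl)
        simp [List.count_append, Ne.symm hk]
      have hcv : (List.count v (xs ++ [v]) : Int) = (List.count v xs : Int) + 1 := by
        simp [List.count_append]
      rw [hsplit]
      simp only [List.map_append, List.map_cons]
      rw [hmapeq l1 hv1, hmapeq l2 hv2, hcv]
      rw [pvScatter_append_cons, ← pvAddAt_add _ v _ 1, pvScatter_addAt,
        ← pvScatter_append_cons]
    · have hmem : v ∉ PySem.Set.ofList xs := fun hc => hv ((PySem.Set.mem_ofList xs v).1 hc)
      have hcont : (PySem.Set.ofList xs).contains v = false := by simpa using hmem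
      rw [hof]
      simp only [PySem.Set.add, hcont, Bool.false_eq_true, if_false]
      have hmapeq : (PySem.Set.ofList xs).map (fun k => (k, (List.count k (xs ++ [v]) : Int))) =
          (PySem.Set.ofList xs).map (fun k => (k, (List.count k xs : Int))) := by
        apply List.map_congr_left
        intro k hk
        have hkx : k ∈ xs := (PySem.Set.mem_ofList xs k).1 hk
        have hkv : k ≠ v := fun hkv => hv (hkv ▸ hkx)
        simp [List.count_append, Ne.symm hkv]
      have hcv : (List.count v (xs ++ [v]) : Int) = 1 := by
        have h0 : List.count v xs = 0 := List.count_eq_zero.2 hv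
        simp [List.count_append, h0]
      simp only [List.map_append, List.map_cons, List.map_nil]
      rw [hmapeq, hcv, pvScatter_append_cons]
      rfl

-- A's inner loop = grayscale map of the row + one +1 per gray value
theorem pv_inner (row : List (Int × Int × Int)) (acc : List (Int × Int × Int)) (h : List Int) :
    row.foldl pvAPix (acc, h) =
      (acc ++ row.map (fun p => let s := pvGray p; (s, s, s)),
       (row.map pvGray).foldl (fun h s => pvAddAt h s 1) h) := by
  induction row generalizing acc h with
  | nil => simp
  | cons t ts ih =>
    rw [List.foldl_cons]
    have : pvAPix (acc, h) t =
        (acc ++ [(pvGray t, pvGray t, pvGray t)], pvAddAt h (pvGray t) 1) := by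
      simp [pvAPix, pvGray, pvAddAt]
    rw [this, ih]
    simp

-- A's outer loop = grayscale map of all rows + one +1 per flattened gray value
theorem pv_outer (rows : List (List (Int × Int × Int))) (acc : List (List (Int × Int × Int)))
    (h : List Int) :
    rows.foldl pvARow (acc, h) =
      (acc ++ rows.map (fun row => row.map (fun p => let s := pvGray p; (s, s, s))),
       (rows.flatMap (fun row => row.map pvGray)).foldl (fun h s => pvAddAt h s 1) h) := by
  induction rows generalizing acc h with
  | nil => simp
  | cons row rs ih =>
    rw [List.foldl_cons]
    have hstep : pvARow (acc, h) row =
        (acc ++ [row.map (fun p => let s := pvGray p; (s, s, s))],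
         (row.map pvGray).foldl (fun h s => pvAddAt h s 1) h) := by
      simp [pvARow, pv_inner row [] h]
    rw [hstep, ih]
    simp [List.foldl_append]

-- ===== VERDICT (by name: the statement is the Claim_ definition above) =====
theorem compute_grayscale_rows_and_hist_spec : Claim_equal_compute_grayscale_rows_and_hist := by
  intro rgb_rows _ _
  unfold Spec_compute_grayscale_rows_and_hist
  simp only [compute_grayscale_rows_and_hist, compute_grayscale_rows_and_hist_alt]
  rw [pv_outer rgb_rows [] (List.replicate 256 (0 : Int)),
    PySem.Dict.foldl_insert_getD_add_one_eq_counter, pvScatter_eq, pv_tally]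
  simp only [List.nil_append]
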